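-- pv_equiv track=rewrite | github.com/zhuchenhua888/github_investment | 韭菜助手_web/api/stock_py/data/data_hushen300.py | merge_by_date
-- ===== SOURCE A (Python) =====
-- from typing import List, Dict
--
-- def merge_by_date(old_arr: List[Dict], new_arr: List[Dict]) -> List[Dict]:
--     date_map: Dict[str, Dict] = {}
--     if old_arr:
--         for it in old_arr:
--             if it and 'date' in it:
--                 date_map[it['date']] = it
--     if new_arr:
--         for it in new_arr:
--             if it and 'date' in it:
--                 date_map[it['date']] = it
--     result = list(date_map.values())
--     result.sort(key=lambda x: x['date'])
--     return result
-- ===== SOURCE B (Python) =====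
-- def merge_by_date(old_arr, new_arr):
--     items = [it for it in (old_arr or []) if it and 'date' in it] + \
--             [it for it in (new_arr or []) if it and 'date' in it]
--     # walk backwards keeping the first hit per date (= the overriding, last-in-order item)
--     seen = set()
--     kept = []
--     for it in reversed(items):
--         if it['date'] not in seen:
--             seen.add(it['date'])
--             kept.append(it)
--     kept.sort(key=lambda x: x['date'])
--     return kept
-- ===== Notes on version B (the rewrite author's own statement) =====
-- stated objective: alternative
-- what changed: Replaces the date-keyed dict of items (last insert wins, then sort the values) by a single reversed scan that keeps the first item per date using a seen-set of date strings, followed by the same key sort.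
import Mathlib
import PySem

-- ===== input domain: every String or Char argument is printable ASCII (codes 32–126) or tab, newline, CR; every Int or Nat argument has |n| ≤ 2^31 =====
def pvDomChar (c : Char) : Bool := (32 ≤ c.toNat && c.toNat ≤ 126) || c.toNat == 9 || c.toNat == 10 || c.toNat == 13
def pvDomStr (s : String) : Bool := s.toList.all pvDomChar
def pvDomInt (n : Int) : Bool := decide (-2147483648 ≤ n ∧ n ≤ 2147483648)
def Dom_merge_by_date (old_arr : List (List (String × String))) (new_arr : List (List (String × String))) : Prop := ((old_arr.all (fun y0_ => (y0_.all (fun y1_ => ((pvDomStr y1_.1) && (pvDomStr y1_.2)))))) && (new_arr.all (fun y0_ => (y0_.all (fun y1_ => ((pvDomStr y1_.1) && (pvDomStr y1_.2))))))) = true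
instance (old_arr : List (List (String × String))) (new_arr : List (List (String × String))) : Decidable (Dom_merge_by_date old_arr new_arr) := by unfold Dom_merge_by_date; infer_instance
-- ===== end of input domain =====

-- B replaces A's date-keyed dict of items (last insert wins, then sort the values) by a reversed scan
-- with a seen-set of dates that keeps the last item per date, followed by the same key sort (objective: alternative).

-- helpers shared by both ports: an item dict's 'date' lookup (first match = Python dict lookup)
def pvItemDate? (it : List (String × String)) : Option String :=
  (it.find? (fun p => p.1 == "date")).map (·.2)

-- "it and 'date' in it"
def pvKeep (it : List (String × String)) : Bool :=
  !it.isEmpty && (pvItemDate? it).isSome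

-- "it['date']" (only ever applied to items passing pvKeep, where the default is unreachable)
def pvDate (it : List (String × String)) : String :=
  (pvItemDate? it).getD ""

-- ===== PORT A =====
-- the `if old_arr:` / `if new_arr:` guards of A only skip a loop over an empty list, a no-op the foldl reproduces
def merge_by_date (old_arr : List (List (String × String))) (new_arr : List (List (String × String))) : List (List (String × String)) :=
  let date_map : PySem.Dict String (List (String × String)) := PySem.Dict.empty
  let date_map := old_arr.foldl (fun d it => if pvKeep it then d.insert (pvDate it) it else d) date_map
  let date_map := new_arr.foldl (fun d it => if pvKeep it then d.insert (pvDate it) it else d) date_map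
  PySem.List.sorted date_map.values pvDate false

-- ===== PORT B =====
-- the body of Source B's reversed-scan loop: state = (seen set of dates, kept items)
def pvStep (st : PySem.Set String × List (List (String × String))) (it : List (String × String)) :
    PySem.Set String × List (List (String × String)) :=
  if PySem.Set.contains st.1 (pvDate it) then st
  else (PySem.Set.add st.1 (pvDate it), st.2 ++ [it])

def merge_by_date_alt (old_arr : List (List (String × String))) (new_arr : List (List (String × String))) : List (List (String × String)) :=
  let items := old_arr.filter pvKeep ++ new_arr.filter pvKeep
  let kept := (items.reverse.foldl pvStep (PySem.Set.empty, [])).2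
  PySem.List.sorted kept pvDate false

-- ===== PRECONDITION & SPEC =====
def Spec_merge_by_date (old_arr : List (List (String × String))) (new_arr : List (List (String × String))) (out : List (List (String × String))) : Prop := out = merge_by_date_alt old_arr new_arr
instance (old_arr : List (List (String × String))) (new_arr : List (List (String × String))) (out : List (List (String × String))) : Decidable (Spec_merge_by_date old_arr new_arr out) := by unfold Spec_merge_by_date; infer_instance

-- ===== CLAIM (what is proved, stated in full; the proofs are below) =====
def Claim_equal_merge_by_date : Prop := ∀ (old_arr : List (List (String × String))) (new_arr : List (List (String × String))), Dom_merge_by_date old_arr new_arr → Spec_merge_by_date old_arr new_arr (merge_by_date old_arr new_arr)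

-- ===== LEMMAS AND PROOFS =====

-- the first element of R whose date is k (with R = L.reverse: the LAST item of L with date k)
def pvFirstWith (R : List (List (String × String))) (k : String) : List (String × String) :=
  (R.find? (fun it => pvDate it == k)).getD []

lemma pvFirstWith_append_of_mem (P Q : List (List (String × String))) (k : String)
    (hk : k ∈ P.map pvDate) : pvFirstWith (P ++ Q) k = pvFirstWith P k := by
  unfold pvFirstWith
  rw [List.find?_append]
  obtain ⟨x, hx, hxk⟩ := List.mem_map.mp hk
  cases h : P.find? (fun it => pvDate it == k) with
  | some a => simp [Option.or]
  | none =>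
    exfalso
    exact (List.find?_eq_none.mp h x hx) (by simp [hxk])

lemma pvFirstWith_date (R : List (List (String × String))) (k : String)
    (hk : k ∈ R.map pvDate) : pvDate (pvFirstWith R k) = k := by
  unfold pvFirstWith
  obtain ⟨x, hx, hxk⟩ := List.mem_map.mp hk
  cases h : R.find? (fun it => pvDate it == k) with
  | some a => have := List.find?_some h; simpa using this
  | none => exact absurd (by simp [hxk] : (fun it => pvDate it == k) x = true) (List.find?_eq_none.mp h x hx)

-- A's dict after the insert loop looks up k to the LAST item of L with date k
lemma getD_fold (L : List (List (String × String)))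
    (d : PySem.Dict String (List (String × String))) (k : String) :
    (L.foldl (fun d it => d.insert (pvDate it) it) d).getD k []
      = (L.reverse.find? (fun it => pvDate it == k)).getD (d.getD k []) := by
  induction L generalizing d with
  | nil => simp
  | cons it rest ih =>
    rw [List.foldl_cons, ih, List.reverse_cons, List.find?_append]
    cases h : rest.reverse.find? (fun it => pvDate it == k) with
    | some a => simp [Option.or]
    | none =>
      simp only [Option.or]
      by_cases he : pvDate it = k
      · simp [List.find?, he]
      · have : (pvDate it == k) = false := by simp [he]
        simp [List.find?, this, PySem.Dict.getD_insert, Ne.symm he]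

-- A's dict values: one item per first-occurrence-ordered distinct date, the last item of L with that date
lemma values_fold (L : List (List (String × String))) :
    (L.foldl (fun d it => d.insert (pvDate it) it)
        (PySem.Dict.empty : PySem.Dict String (List (String × String)))).values
      = (PySem.Set.ofList (L.map pvDate)).map (pvFirstWith L.reverse) := by
  have hkeys : (L.foldl (fun d it => d.insert (pvDate it) it)
      (PySem.Dict.empty : PySem.Dict String (List (String × String)))).keys
      = PySem.Set.ofList (L.map pvDate) := by
    rw [PySem.Dict.keys_foldl_insert_key L pvDate (fun _ it => it)]
    simp [PySem.Set.update_nil_left]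
  have hnd : (L.foldl (fun d it => d.insert (pvDate it) it)
      (PySem.Dict.empty : PySem.Dict String (List (String × String)))).keys.Nodup := by
    rw [hkeys]; exact PySem.Set.nodup_ofList _
  rw [PySem.Dict.values_eq_map_keys _ hnd [], hkeys]
  refine List.map_congr_left fun k hk => ?_
  rw [getD_fold]
  simp [pvFirstWith, PySem.Dict.getD_empty]

-- B's reversed-scan loop: seen = the distinct dates of R in order, kept = their first R-items
lemma kept_fold (R : List (List (String × String))) :
    R.foldl pvStep (PySem.Set.empty, [])
      = (PySem.Set.ofList (R.map pvDate), (PySem.Set.ofList (R.map pvDate)).map (pvFirstWith R)) := by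
  induction R using List.reverseRecOn with
  | nil => simp [PySem.Set.ofList, PySem.Set.empty]
  | append_singleton P it ih =>
    rw [List.foldl_append, List.foldl_cons, List.foldl_nil, ih]
    rw [List.map_append, List.map_singleton, PySem.Set.ofList_append_singleton]
    by_cases hm : pvDate it ∈ PySem.Set.ofList (P.map pvDate)
    · have hc : (PySem.Set.ofList (P.map pvDate)).contains (pvDate it) = true :=
        (PySem.Set.contains_iff _ _).mpr hm
      rw [pvStep, hc]
      simp only [if_true, PySem.Set.add_of_mem hm]
      congr 1
      refine List.map_congr_left fun k hk => ?_
      exact (pvFirstWith_append_of_mem P [it] k ((PySem.Set.mem_ofList _ _).mp hk)).symm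
    · have hc : (PySem.Set.ofList (P.map pvDate)).contains (pvDate it) = false := by
        rw [← Bool.not_eq_true, PySem.Set.contains_iff]; exact hm
      rw [pvStep, hc]
      simp only [Bool.false_eq_true, if_false, PySem.Set.add_of_not_mem hm]
      congr 1
      rw [List.map_append, List.map_singleton]
      have hnotP : pvDate it ∉ P.map pvDate := fun h => hm ((PySem.Set.mem_ofList _ _).mpr h)
      congr 1
      · refine List.map_congr_left fun k hk => ?_
        exact (pvFirstWith_append_of_mem P [it] k ((PySem.Set.mem_ofList _ _).mp hk)).symm
      · have hfind : P.find? (fun x => pvDate x == pvDate it) = none := by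
          rw [List.find?_eq_none]
          intro x hx hbe
          exact hnotP (List.mem_map.mpr ⟨x, hx, by simpa using hbe⟩)
        simp [pvFirstWith, List.find?_append, hfind, Option.or, List.find?]

lemma pairwise_lt_of_le_nodup (ms : List (List (String × String)))
    (h1 : ms.Pairwise (fun a b => pvDate a ≤ pvDate b))
    (h2 : (ms.map pvDate).Nodup) :
    ms.Pairwise (fun a b => pvDate a < pvDate b) := by
  induction ms with
  | nil => exact List.Pairwise.nil
  | cons a t ih =>
    rw [List.pairwise_cons] at h1 ⊢
    rw [List.map_cons, List.nodup_cons] at h2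
    refine ⟨fun b hb => lt_of_le_of_ne (h1.1 b hb) fun he => h2.1 (he ▸ List.mem_map_of_mem hb), ih h1.2 h2.2⟩

-- ===== VERDICT (by name: the statement is the Claim_ definition above) =====
theorem merge_by_date_spec : Claim_equal_merge_by_date := by
  intro old_arr new_arr _
  unfold Spec_merge_by_date merge_by_date merge_by_date_alt
  simp only []
  rw [← List.foldl_filter, ← List.foldl_filter, ← List.foldl_append]
  set L := old_arr.filter pvKeep ++ new_arr.filter pvKeep with hL
  rw [values_fold L, kept_fold L.reverse]
  simp only []
  set f := pvFirstWith L.reverse with hf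
  set X := PySem.Set.ofList (L.map pvDate) with hX
  set Y := PySem.Set.ofList (L.reverse.map pvDate) with hY
  have hYX : Y.Perm X := by
    refine (List.perm_ext_iff_of_nodup (PySem.Set.nodup_ofList _) (PySem.Set.nodup_ofList _)).mpr ?_
    intro a
    simp [PySem.Set.mem_ofList]
  have hperm : (PySem.List.sorted (Y.map f) pvDate false).Perm (X.map f) :=
    (PySem.List.sorted_perm _ _ _).trans (hYX.map f)
  have hmapY : (Y.map f).map pvDate = Y := by
    rw [List.map_map]
    have : ∀ k ∈ Y, (pvDate ∘ f) k = k := by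
      intro k hk
      refine pvFirstWith_date L.reverse k ?_
      exact (PySem.Set.mem_ofList _ _).mp hk
    rw [List.map_congr_left this]; exact List.map_id Y
  have hnodup : ((PySem.List.sorted (Y.map f) pvDate false).map pvDate).Nodup := by
    have hp : ((PySem.List.sorted (Y.map f) pvDate false).map pvDate).Perm Y := by
      have := (PySem.List.sorted_perm (Y.map f) pvDate false).map pvDate
      rwa [hmapY] at this
    exact hp.nodup_iff.mpr (PySem.Set.nodup_ofList _)
  have hlt := pairwise_lt_of_le_nodup _ (PySem.List.sorted_pairwise (Y.map f) pvDate) hnodup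
  exact PySem.List.sorted_eq_of_perm_of_pairwise_lt _ _ pvDate hperm hlt
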